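-- pv_equiv track=rewrite | github.com/jtikalsky/i2c_ila_decode | i2c_ila_decode.py | format_bitstream
-- ===== SOURCE A (Python) =====
-- def format_bitstream(bitstream: str) -> str:
-- 	out = ''
-- 	count = 0
-- 	for c in bitstream:
-- 		if c in '[]':
-- 			count = 0
-- 			out = out.rstrip() + f' {c} '
-- 		elif c in '01':
-- 			count += 1
-- 			if count == 9:
-- 				if c == '0':
-- 					out += ' A '
-- 				elif c == '1':
-- 					out += ' N '
-- 				else:
-- 					out += f' {c} '
-- 				count = 0
-- 			else:
-- 				out += c
-- 	return out
-- ===== SOURCE B (Python) =====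
-- def _fmt_run(bits):
--     # format a run of data bits: after every 8 bits the 9th is an ACK ('0') / NACK ('1') marker
--     out = ''
--     for i in range(0, len(bits), 9):
--         g = bits[i:i + 9]
--         if len(g) == 9:
--             out += g[:8] + (' A ' if g[8] == '0' else ' N ')
--         else:
--             out += g
--     return out
--
--
-- def format_bitstream(bitstream: str) -> str:
--     out = ''
--     run = ''
--     for c in bitstream:
--         if c in '[]':
--             out = (out + _fmt_run(run)).rstrip() + f' {c} '
--             run = ''
--         elif c in '01':
--             run += c
--     return out + _fmt_run(run)
-- ===== Notes on version B (the rewrite author's own statement) =====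
-- stated objective: alternative
-- what changed: B replaces A's counter-driven state machine (emitting each bit immediately and tracking a mod-9 counter) with a buffer-and-chunk decomposition: it accumulates each run of data bits between brackets and formats it by slicing into 9-bit groups (8 data bits + ACK/NACK marker).
import Mathlib
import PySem

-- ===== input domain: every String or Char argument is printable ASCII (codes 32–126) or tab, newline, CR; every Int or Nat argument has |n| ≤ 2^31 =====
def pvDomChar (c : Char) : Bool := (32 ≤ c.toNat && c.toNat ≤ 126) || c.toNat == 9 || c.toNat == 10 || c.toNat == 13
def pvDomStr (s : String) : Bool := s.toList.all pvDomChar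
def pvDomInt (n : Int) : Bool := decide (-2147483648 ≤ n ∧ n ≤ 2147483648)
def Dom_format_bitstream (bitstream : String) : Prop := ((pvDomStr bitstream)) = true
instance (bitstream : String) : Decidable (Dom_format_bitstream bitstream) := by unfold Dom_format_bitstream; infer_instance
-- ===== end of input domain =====

-- B reformats the same I2C bitstream by buffering each bit run and chunking it into 9-bit
-- groups, instead of A's per-character counter state machine; same output, same cost.

-- ===== PORT A =====
-- one loop step of A: state = (out, count)
def stepA (st : List Char × Int) (c : Char) : List Char × Int :=
  if c = '[' ∨ c = ']' then
    (PySem.Chars.rstrip st.1 ++ [' ', c, ' '], 0)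
  else if c = '0' ∨ c = '1' then
    (if st.2 + 1 = 9 then
      (st.1 ++ (if c = '0' then [' ', 'A', ' ']
                else if c = '1' then [' ', 'N', ' ']
                else [' ', c, ' ']), 0)
    else (st.1 ++ [c], st.2 + 1))
  else st

def format_bitstream (bitstream : String) : String :=
  String.mk (bitstream.toList.foldl stepA ([], 0)).1

-- ===== PORT B =====
-- the marker for the 9th bit of a group: ACK for '0', NACK otherwise
def markB (c : Char) : List Char := if c = '0' then [' ', 'A', ' '] else [' ', 'N', ' ']

-- _fmt_run: consume 9-bit groups (8 data bits + marker), leftover verbatim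
def fmtRun : List Char → List Char
  | a :: b :: c :: d :: e :: f :: g :: h :: i :: rest =>
      a :: b :: c :: d :: e :: f :: g :: h :: (markB i ++ fmtRun rest)
  | bits => bits

-- one loop step of B: state = (out, run)
def stepB (st : List Char × List Char) (c : Char) : List Char × List Char :=
  if c = '[' ∨ c = ']' then
    (PySem.Chars.rstrip (st.1 ++ fmtRun st.2) ++ [' ', c, ' '], [])
  else if c = '0' ∨ c = '1' then
    (st.1, st.2 ++ [c])
  else st

def format_bitstream_alt (bitstream : String) : String :=
  let p := bitstream.toList.foldl stepB ([], [])
  String.mk (p.1 ++ fmtRun p.2)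

-- ===== PRECONDITION & SPEC =====
def Spec_format_bitstream (bitstream : String) (out : String) : Prop := out = format_bitstream_alt bitstream
instance (bitstream : String) (out : String) : Decidable (Spec_format_bitstream bitstream out) := by unfold Spec_format_bitstream; infer_instance

-- ===== CLAIM (what is proved, stated in full; the proofs are below) =====
def Claim_equal_format_bitstream : Prop := ∀ (bitstream : String), Dom_format_bitstream bitstream → Spec_format_bitstream bitstream (format_bitstream bitstream)

-- ===== LEMMAS AND PROOFS =====

lemma fmtRun_snoc (run : List Char) (c : Char) :
    fmtRun (run ++ [c]) =
      fmtRun run ++ (if run.length % 9 = 8 then markB c else [c]) := by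
  induction run using fmtRun.induct with
  | case1 a b d e f g h i j rest ih =>
      simp only [List.cons_append, fmtRun, List.length_cons]
      have h2 : ((rest.length + 1 + 1 + 1 + 1 + 1 + 1 + 1 + 1 + 1) % 9 = 8) ↔ (rest.length % 9 = 8) := by omega
      simp only [ih, h2]
      split <;> simp
  | case2 bits hne =>
      match bits, hne with
      | [], _ => simp [fmtRun]
      | [a], _ => simp [fmtRun]
      | [a,b], _ => simp [fmtRun]
      | [a,b,d], _ => simp [fmtRun]
      | [a,b,d,e], _ => simp [fmtRun]
      | [a,b,d,e,f], _ => simp [fmtRun]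
      | [a,b,d,e,f,g], _ => simp [fmtRun]
      | [a,b,d,e,f,g,h], _ => simp [fmtRun]
      | [a,b,d,e,f,g,h,i], _ => simp [fmtRun]
      | a::b::d::e::f::g::h::i::j::rest, hne => exact absurd rfl (hne a b d e f g h i j rest)

-- loop invariant: A's state is (outB ++ fmtRun run, run.length % 9)
lemma loop_eq (cs : List Char) (outB run : List Char)
    (h : ∀ c ∈ run, c = '0' ∨ c = '1') :
    (cs.foldl stepA (outB ++ fmtRun run, ((run.length : Int) % 9))).1 =
      (cs.foldl stepB (outB, run)).1 ++ fmtRun (cs.foldl stepB (outB, run)).2 := by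
  induction cs generalizing outB run with
  | nil => simp
  | cons c cs ih =>
    simp only [List.foldl_cons]
    by_cases hb : c = '[' ∨ c = ']'
    · have := ih (PySem.Chars.rstrip (outB ++ fmtRun run) ++ [' ', c, ' ']) []
        (by intro x hx; cases hx)
      simpa [stepA, stepB, hb, fmtRun] using this
    · by_cases hc : c = '0' ∨ c = '1'
      · have hmark : (if c = '0' then [' ', 'A', ' ']
            else if c = '1' then [' ', 'N', ' '] else [' ', c, ' ']) = markB c := by
          rcases hc with rfl | rfl <;> simp [markB]
        have h' : ∀ x ∈ run ++ [c], x = '0' ∨ x = '1' := by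
          intro x hx
          rcases List.mem_append.mp hx with hx | hx
          · exact h x hx
          · simp at hx; subst hx; exact hc
        by_cases h8 : run.length % 9 = 8
        · have h9 : (run.length : Int) % 9 + 1 = 9 := by omega
          have := ih outB (run ++ [c]) h'
          rw [fmtRun_snoc, if_pos h8] at this
          have hlen : (((run ++ [c]).length : Int) % 9) = 0 := by
            simp only [List.length_append, List.length_cons, List.length_nil]
            omega
          rw [hlen] at this
          simpa [stepA, stepB, hb, hc, h9, hmark, List.append_assoc] using this
        · have h9 : ¬ ((run.length : Int) % 9 + 1 = 9) := by omega
          have := ih outB (run ++ [c]) h'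
          rw [fmtRun_snoc, if_neg h8] at this
          have hlen : (((run ++ [c]).length : Int) % 9) = (run.length : Int) % 9 + 1 := by
            simp only [List.length_append, List.length_cons, List.length_nil]
            omega
          rw [hlen] at this
          simpa [stepA, stepB, hb, hc, h9, List.append_assoc] using this
      · simpa [stepA, stepB, hb, hc] using ih outB run h

-- ===== VERDICT (by name: the statement is the Claim_ definition above) =====
theorem format_bitstream_spec : Claim_equal_format_bitstream := by
  intro s _
  unfold Spec_format_bitstream format_bitstream format_bitstream_alt
  have := loop_eq s.toList [] [] (by intro c hc; cases hc)
  simpa [fmtRun] using congrArg String.mk this
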